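-- pv_equiv track=rewrite | github.com/FCAS-LAB/FHE_ESWEEK | src/mapping.py | swap_and_evaluate
-- ===== SOURCE A (Python) =====
-- def calculate_comm_volume(cuts, s_weight):
--     total_comm_volume = 0
--     for p in range(len(cuts)):
--         for q in range(p + 1, len(cuts)):
--             for v_r in cuts[p]:
--                 for v_s in cuts[q]:
--                     total_comm_volume += s_weight.get((v_r, v_s), 0)
--     return total_comm_volume
--
-- def swap_and_evaluate(cuts, s_weight):
--     original_comm_volume = calculate_comm_volume(cuts, s_weight)
--     while True:
--         swapped = 0
--         for p in range(len(cuts)):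
--             if swapped:
--                 break
--             for q in range(p + 1, len(cuts)):
--                 if swapped:
--                     break
--                 for vj_index in range(len(cuts[p])):
--                     if swapped:
--                         break
--                     for vk_index in range(len(cuts[q])):
--                         vj = cuts[p][vj_index]
--                         vk = cuts[q][vk_index]
--
--                         # 交换尝试
--                         cuts[p][vj_index] = vk
--                         cuts[q][vk_index] = vj
--
--                         new_comm_volume = calculate_comm_volume(cuts, s_weight)
--                         if new_comm_volume < original_comm_volume:
--                             original_comm_volume = new_comm_volume  # 更新最小通信量并保持交换
--                             swapped = 1
--                             break
--
--                         else:
--                             # 撤销交换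
--                             cuts[p][vj_index] = vj
--                             cuts[q][vk_index] = vk
--         if swapped == 0:  # 不再有交换了，就退出
--             break
--         return cuts
-- ===== SOURCE B (Python) =====
-- def swap_and_evaluate(cuts, s_weight):
--     # Incremental evaluation: the change in communication volume caused by a
--     # cross-partition swap is a delta built from per-vertex costs (hoisted out
--     # of the inner loops), instead of recomputing the full volume per swap.
--     n = len(cuts)
--
--     def w(a, b):
--         return s_weight.get((a, b), 0)
--
--     def cost(x, r):
--         # cost of vertex x sitting in partition r against all other partitions
--         return (sum(w(y, x) for part in cuts[:r] for y in part)
--                 + sum(w(x, y) for part in cuts[r + 1:] for y in part))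
--
--     for p in range(n):
--         for q in range(p + 1, n):
--             A, B = cuts[p], cuts[q]
--             a_at_p = [cost(v, p) for v in A]
--             a_at_q = [cost(v, q) for v in A]
--             b_at_p = [cost(v, p) for v in B]
--             b_at_q = [cost(v, q) for v in B]
--             for j in range(len(A)):
--                 for k in range(len(B)):
--                     vj, vk = A[j], B[k]
--                     delta = (b_at_p[k] - a_at_p[j] + a_at_q[j] - b_at_q[k]
--                              - w(vj, vj) + w(vk, vj) + w(vj, vk) - w(vk, vk))
--                     if delta < 0:
--                         cuts[p][j] = vk
--                         cuts[q][k] = vj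
--                         return cuts
--     return None
-- ===== Notes on version B (the rewrite author's own statement) =====
-- stated objective: faster
-- what changed: Instead of recomputing the full O(N^2) communication volume for every candidate swap, B evaluates each swap by an O(N) incremental delta built from per-vertex cross-partition costs, scanning a flattened candidate list.
import Mathlib
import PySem

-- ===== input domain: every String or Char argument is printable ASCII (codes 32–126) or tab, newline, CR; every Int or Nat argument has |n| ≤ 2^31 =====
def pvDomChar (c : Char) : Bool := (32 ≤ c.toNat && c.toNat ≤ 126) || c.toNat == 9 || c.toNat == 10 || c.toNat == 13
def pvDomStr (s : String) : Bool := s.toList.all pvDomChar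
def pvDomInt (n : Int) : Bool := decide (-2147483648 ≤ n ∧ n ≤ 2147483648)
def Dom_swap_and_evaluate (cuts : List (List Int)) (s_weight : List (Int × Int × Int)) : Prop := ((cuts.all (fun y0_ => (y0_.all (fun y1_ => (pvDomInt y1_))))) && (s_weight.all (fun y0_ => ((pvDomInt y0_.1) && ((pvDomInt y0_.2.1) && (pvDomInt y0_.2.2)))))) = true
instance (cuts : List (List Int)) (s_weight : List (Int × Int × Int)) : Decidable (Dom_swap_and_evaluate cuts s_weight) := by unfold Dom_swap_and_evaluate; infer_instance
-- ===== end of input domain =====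

-- B replaces A's full O(N^2) recomputation of the communication volume per candidate
-- swap by an O(N) incremental delta over a flattened candidate list (return value
-- equivalence; both A and B mutate `cuts` in place identically on success).

-- ===== PORT A =====
-- dict.get((a,b), 0) on the association list (first match, Python dict convention)
def wget : List (Int × Int × Int) → Int → Int → Int
  | [], _, _ => 0
  | (a, b, v) :: t, x, y => if a = x ∧ b = y then v else wget t x y

-- total_comm_volume: the four nested loops of calculate_comm_volume
def calcCV (cuts : List (List Int)) (sw : List (Int × Int × Int)) : Int :=
  (List.range cuts.length).foldl (fun acc p =>
    (List.range' (p + 1) (cuts.length - (p + 1))).foldl (fun acc q =>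
      (cuts.getD p []).foldl (fun acc vr =>
        (cuts.getD q []).foldl (fun acc vs => acc + wget sw vr vs) acc) acc) acc) 0

def swap_and_evaluate (cuts : List (List Int)) (s_weight : List (Int × Int × Int)) : Option (List (List Int)) :=
  let orig := calcCV cuts s_weight
  (List.range cuts.length).findSome? (fun p =>
    (List.range' (p + 1) (cuts.length - (p + 1))).findSome? (fun q =>
      (List.range (cuts.getD p []).length).findSome? (fun j =>
        (List.range (cuts.getD q []).length).findSome? (fun k =>
          let vj := (cuts.getD p []).getD j 0
          let vk := (cuts.getD q []).getD k 0
          let newCuts := (cuts.set p ((cuts.getD p []).set j vk)).set q ((cuts.getD q []).set k vj)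
          if calcCV newCuts s_weight < orig then some newCuts else none))))

-- ===== PORT B =====
-- cost of vertex x sitting in partition r against all other partitions
def costP (cuts : List (List Int)) (sw : List (Int × Int × Int)) (x : Int) (r : Nat) : Int :=
  ((cuts.take r).map (fun part => (part.map (fun y => wget sw y x)).sum)).sum
  + ((cuts.drop (r + 1)).map (fun part => (part.map (fun y => wget sw x y)).sum)).sum

def swap_and_evaluate_alt (cuts : List (List Int)) (s_weight : List (Int × Int × Int)) : Option (List (List Int)) :=
  let n := cuts.length
  (List.range n).findSome? (fun p =>
    (List.range' (p + 1) (n - (p + 1))).findSome? (fun q =>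
      let A := cuts.getD p []
      let B := cuts.getD q []
      let aAtP := A.map (fun v => costP cuts s_weight v p)
      let aAtQ := A.map (fun v => costP cuts s_weight v q)
      let bAtP := B.map (fun v => costP cuts s_weight v p)
      let bAtQ := B.map (fun v => costP cuts s_weight v q)
      (List.range A.length).findSome? (fun j =>
        (List.range B.length).findSome? (fun k =>
          let vj := A.getD j 0
          let vk := B.getD k 0
          let delta := bAtP.getD k 0 - aAtP.getD j 0 + aAtQ.getD j 0 - bAtQ.getD k 0
            - wget s_weight vj vj + wget s_weight vk vj + wget s_weight vj vk - wget s_weight vk vk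
          if delta < 0 then
            some ((cuts.set p (A.set j vk)).set q (B.set k vj))
          else none))))

-- ===== PRECONDITION & SPEC =====
def Spec_swap_and_evaluate (cuts : List (List Int)) (s_weight : List (Int × Int × Int)) (out : Option (List (List Int))) : Prop := out = swap_and_evaluate_alt cuts s_weight
instance (cuts : List (List Int)) (s_weight : List (Int × Int × Int)) (out : Option (List (List Int))) : Decidable (Spec_swap_and_evaluate cuts s_weight out) := by unfold Spec_swap_and_evaluate; infer_instance

-- ===== CLAIM (what is proved, stated in full; the proofs are below) =====
def Claim_equal_swap_and_evaluate : Prop := ∀ (cuts : List (List Int)) (s_weight : List (Int × Int × Int)), Dom_swap_and_evaluate cuts s_weight → Spec_swap_and_evaluate cuts s_weight (swap_and_evaluate cuts s_weight)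

-- ===== LEMMAS AND PROOFS =====

-- integer sum of f over a list (proof-side abbreviation)
def sL {α : Type} (l : List α) (f : α → Int) : Int := (l.map f).sum

theorem sL_nil {α : Type} (f : α → Int) : sL [] f = 0 := rfl

theorem sL_cons {α : Type} (x : α) (l : List α) (f : α → Int) :
    sL (x :: l) f = f x + sL l f := by simp [sL]

theorem sL_single {α : Type} (x : α) (f : α → Int) : sL [x] f = f x := by simp [sL]

theorem sL_congr {α : Type} {l : List α} {f g : α → Int}
    (h : ∀ x ∈ l, f x = g x) : sL l f = sL l g := by
  unfold sL; rw [List.map_congr_left h]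

theorem sL_sub_add {α : Type} (l : List α) (f g h : α → Int) :
    sL l (fun x => f x - g x + h x) = sL l f - sL l g + sL l h := by
  induction l with
  | nil => simp [sL]
  | cons a t ih => simp only [sL_cons] at *; rw [ih]; ring

theorem getD_eq_getD {α : Type} (l : List α) (j : Nat) (d d' : α) (h : j < l.length) :
    l.getD j d = l.getD j d' := by
  rw [List.getD_eq_getElem _ _ h, List.getD_eq_getElem _ _ h]

theorem sum_map_eq_sL {α : Type} (l : List α) (f : α → Int) : (l.map f).sum = sL l f := rfl

theorem sL_set {α : Type} {l : List α} {j : Nat} (v : α) (f : α → Int)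
    (h : j < l.length) :
    sL (l.set j v) f = sL l f - f (l.getD j v) + f v := by
  induction l generalizing j with
  | nil => simp at h
  | cons a t ih =>
    cases j with
    | zero => simp [sL_cons]; ring
    | succ j =>
      simp only [List.set_cons_succ, sL_cons, List.getD_cons_succ]
      rw [ih (by simpa using h)]; ring

-- cross-communication of partition X (earlier) against partition Y (later)
def tT (sw : List (Int × Int × Int)) (X Y : List Int) : Int :=
  sL X (fun x => sL Y (fun y => wget sw x y))

-- structural form of the total communication volume
def pairCV (sw : List (Int × Int × Int)) : List (List Int) → Int
  | [] => 0
  | X :: t => sL t (fun Y => tT sw X Y) + pairCV sw t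

-- communication of partition content X placed at slot p against all other partitions
def rowC (sw : List (Int × Int × Int)) (cuts : List (List Int)) (p : Nat) (X : List Int) : Int :=
  sL (cuts.take p) (fun Y => tT sw Y X) + sL (cuts.drop (p + 1)) (fun Y => tT sw X Y)

theorem costP_eq (cuts : List (List Int)) (sw : List (Int × Int × Int)) (x : Int) (r : Nat) :
    costP cuts sw x r = rowC sw cuts r [x] := by
  simp [costP, rowC, sL, tT]

theorem tT_single_left (sw : List (Int × Int × Int)) (u : Int) (Y : List Int) :
    tT sw [u] Y = sL Y (fun y => wget sw u y) := by simp [tT, sL_single]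

theorem tT_single_right (sw : List (Int × Int × Int)) (X : List Int) (u : Int) :
    tT sw X [u] = sL X (fun x => wget sw x u) := by
  unfold tT; exact sL_congr (fun x _ => sL_single u _)

theorem tT_set_left (sw : List (Int × Int × Int)) {X : List Int} {j : Nat} (v : Int)
    (Y : List Int) (h : j < X.length) :
    tT sw (X.set j v) Y = tT sw X Y - tT sw [X.getD j 0] Y + tT sw [v] Y := by
  rw [tT, sL_set v (fun x => sL Y (fun y => wget sw x y)) h, getD_eq_getD X j v 0 h]
  simp only [tT_single_left]; rfl

theorem tT_set_right (sw : List (Int × Int × Int)) (X : List Int) {Y : List Int} {k : Nat}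
    (v : Int) (h : k < Y.length) :
    tT sw X (Y.set k v) = tT sw X Y - tT sw X [Y.getD k 0] + tT sw X [v] := by
  rw [tT_single_right, tT_single_right]
  unfold tT
  rw [show (fun x => sL (Y.set k v) (fun y => wget sw x y))
      = (fun x => sL Y (fun y => wget sw x y) - wget sw x (Y.getD k 0) + wget sw x v) from ?_]
  · exact sL_sub_add X _ _ _
  · funext x
    rw [sL_set v (fun y => wget sw x y) h, getD_eq_getD Y k v 0 h]

theorem rowC_set (sw : List (Int × Int × Int)) (cuts : List (List Int)) (p : Nat)
    {X : List Int} {j : Nat} (v : Int) (h : j < X.length) :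
    rowC sw cuts p (X.set j v)
      = rowC sw cuts p X - rowC sw cuts p [X.getD j 0] + rowC sw cuts p [v] := by
  unfold rowC
  rw [sL_congr (fun Y _ => tT_set_right sw Y v h), sL_sub_add,
    sL_congr (fun Y _ => tT_set_left sw v Y h), sL_sub_add]
  ring

theorem pairCV_set (sw : List (Int × Int × Int)) :
    ∀ (cuts : List (List Int)) (p : Nat) (X' : List Int), p < cuts.length →
    pairCV sw (cuts.set p X')
      = pairCV sw cuts - rowC sw cuts p (cuts.getD p []) + rowC sw cuts p X' := by
  intro cuts
  induction cuts with
  | nil => intro p X' h; simp at h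
  | cons h t ih =>
    intro p X' hp
    cases p with
    | zero => simp [pairCV, rowC, sL_nil]; exact add_comm _ _
    | succ p =>
      have hp' : p < t.length := by simpa using hp
      simp only [List.set_cons_succ, pairCV, List.getD_cons_succ]
      rw [ih p X' hp', sL_set X' (fun Y => tT sw h Y) hp', getD_eq_getD t p X' [] hp']
      have hrow : ∀ X : List Int, rowC sw (h :: t) (p + 1) X = tT sw h X + rowC sw t p X := by
        intro X; simp only [rowC, List.take_succ_cons, List.drop_succ_cons, sL_cons]; ring
      rw [hrow, hrow]
      ring

theorem costP_update_before (cuts : List (List Int)) (sw : List (Int × Int × Int))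
    {p q j : Nat} {A : List Int} {vj : Int} (v x : Int)
    (hA : cuts.getD p [] = A) (hvj : A.getD j 0 = vj)
    (hpq : p < q) (hq : q < cuts.length) (hj : j < A.length) :
    costP (cuts.set p (A.set j v)) sw x q
      = costP cuts sw x q - wget sw vj x + wget sw v x := by
  unfold costP
  simp only [sum_map_eq_sL]
  rw [List.take_set, List.drop_set_of_lt (by omega : p < q + 1)]
  have hplen : p < (cuts.take q).length := by
    simp [List.length_take]; omega
  rw [sL_set (A.set j v) (fun part => sL part (fun y => wget sw y x)) hplen]
  have hgd : (cuts.take q).getD p (A.set j v) = A := by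
    rw [List.getD_eq_getElem _ _ hplen, List.getElem_take, ← hA,
      List.getD_eq_getElem _ _ (by omega)]
  rw [hgd, sL_set v (fun y => wget sw y x) hj, getD_eq_getD A j v 0 hj, hvj]
  ring

-- the central delta identity: total volume after the (p,j)↔(q,k) swap
theorem pairCV_swap (cuts : List (List Int)) (sw : List (Int × Int × Int))
    {p q j k : Nat} {A B : List Int} {vj vk : Int}
    (hA : cuts.getD p [] = A) (hB : cuts.getD q [] = B)
    (hvj : A.getD j 0 = vj) (hvk : B.getD k 0 = vk)
    (hpq : p < q) (hq : q < cuts.length) (hj : j < A.length) (hk : k < B.length) :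
    pairCV sw ((cuts.set p (A.set j vk)).set q (B.set k vj))
      = pairCV sw cuts
        + (costP cuts sw vk p - costP cuts sw vj p
          + costP cuts sw vj q - costP cuts sw vk q
          - wget sw vj vj + wget sw vk vj + wget sw vj vk - wget sw vk vk) := by
  have hp : p < cuts.length := by omega
  have h1 : pairCV sw (cuts.set p (A.set j vk))
      = pairCV sw cuts - costP cuts sw vj p + costP cuts sw vk p := by
    rw [pairCV_set sw cuts p _ hp, hA, rowC_set sw cuts p vk hj, hvj,
      ← costP_eq, ← costP_eq]
    ring
  have hq1 : q < (cuts.set p (A.set j vk)).length := by simpa using hq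
  have hgq : (cuts.set p (A.set j vk)).getD q [] = B := by
    rw [List.getD_eq_getElem _ _ hq1, List.getElem_set_ne (by omega), ← hB,
      List.getD_eq_getElem _ _ hq]
  rw [pairCV_set sw _ q _ hq1, hgq, rowC_set sw _ q vj hk, hvk, h1,
    ← costP_eq, ← costP_eq,
    costP_update_before cuts sw vk vj hA hvj hpq hq hj,
    costP_update_before cuts sw vk vk hA hvj hpq hq hj]
  ring

theorem map_range'_getD {α : Type} :
    ∀ (k : Nat) (l : List α) (a : Nat) (d : α), l.length - a = k →
    (List.range' a k).map (fun i => l.getD i d) = l.drop a := by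
  intro k
  induction k with
  | zero =>
    intro l a d h
    simp [List.drop_eq_nil_of_le (by omega : l.length ≤ a)]
  | succ k ih =>
    intro l a d h
    have ha : a < l.length := by omega
    rw [List.range'_succ, List.map_cons, List.getD_eq_getElem _ _ ha,
      ih l (a + 1) d (by omega), List.drop_eq_getElem_cons ha]

theorem sum_over_range' (cuts : List (List Int)) (g : List Int → Int) (a : Nat) :
    ((List.range' a (cuts.length - a)).map (fun q => g (cuts.getD q []))).sum
      = sL (cuts.drop a) g := by
  rw [show (fun q => g (cuts.getD q [])) = g ∘ (fun q => cuts.getD q []) from rfl,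
    ← List.map_map, map_range'_getD (cuts.length - a) cuts a [] rfl]
  rfl

theorem pairCV_drop (sw : List (Int × Int × Int)) :
    ∀ (k : Nat) (cuts : List (List Int)) (a : Nat), cuts.length - a = k →
    ((List.range' a k).map (fun p =>
        sL (cuts.drop (p + 1)) (fun Y => tT sw (cuts.getD p []) Y))).sum
      = pairCV sw (cuts.drop a) := by
  intro k
  induction k with
  | zero =>
    intro cuts a h
    simp [List.drop_eq_nil_of_le (by omega : cuts.length ≤ a), pairCV]
  | succ k ih =>
    intro cuts a h
    have ha : a < cuts.length := by omega
    rw [List.range'_succ, List.map_cons, List.sum_cons, ih cuts (a + 1) (by omega),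
      List.drop_eq_getElem_cons ha]
    simp only [pairCV, List.getD_eq_getElem _ _ ha]

theorem calcCV_eq (cuts : List (List Int)) (sw : List (Int × Int × Int)) :
    calcCV cuts sw = pairCV sw cuts := by
  have h1 : calcCV cuts sw
      = ((List.range cuts.length).map (fun p =>
          ((List.range' (p + 1) (cuts.length - (p + 1))).map (fun q =>
            tT sw (cuts.getD p []) (cuts.getD q []))).sum)).sum := by
    unfold calcCV
    simp only [PySem.List.foldl_add, zero_add]
    rfl
  rw [h1, List.map_congr_left
      (fun p _ => sum_over_range' cuts (fun Y => tT sw (cuts.getD p []) Y) (p + 1)),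
    List.range_eq_range']
  exact pairCV_drop sw cuts.length cuts 0 (by omega)

theorem findSome?_congr {α β : Type} {l : List α} {f g : α → Option β}
    (h : ∀ x ∈ l, f x = g x) : l.findSome? f = l.findSome? g := by
  induction l with
  | nil => rfl
  | cons a t ih =>
    simp only [List.findSome?_cons, h a (by simp)]
    cases g a with
    | none => exact ih (fun x hx => h x (by simp [hx]))
    | some b => rfl

theorem getD_map_int (l : List Int) (f : Int → Int) {j : Nat} (h : j < l.length) :
    (l.map f).getD j 0 = f (l.getD j 0) := by
  rw [List.getD_eq_getElem _ _ (by simpa using h), List.getElem_map,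
    List.getD_eq_getElem _ _ h]

-- ===== VERDICT (by name: the statement is the Claim_ definition above) =====
theorem swap_and_evaluate_spec : Claim_equal_swap_and_evaluate := by
  intro cuts sw _
  unfold Spec_swap_and_evaluate swap_and_evaluate swap_and_evaluate_alt
  apply findSome?_congr
  intro p hp
  apply findSome?_congr
  intro q hq
  apply findSome?_congr
  intro j hj
  apply findSome?_congr
  intro k hk
  have hp' : p < cuts.length := List.mem_range.mp hp
  have hq' : p < q ∧ q < cuts.length := by
    have := List.mem_range'_1.mp hq; omega
  have hj' : j < (cuts.getD p []).length := List.mem_range.mp hj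
  have hk' : k < (cuts.getD q []).length := List.mem_range.mp hk
  have key := pairCV_swap cuts sw rfl rfl rfl rfl hq'.1 hq'.2 hj' hk'
  have hiff : calcCV ((cuts.set p ((cuts.getD p []).set j ((cuts.getD q []).getD k 0))).set q
        ((cuts.getD q []).set k ((cuts.getD p []).getD j 0))) sw < calcCV cuts sw
      ↔ costP cuts sw ((cuts.getD q []).getD k 0) p - costP cuts sw ((cuts.getD p []).getD j 0) p
          + costP cuts sw ((cuts.getD p []).getD j 0) q - costP cuts sw ((cuts.getD q []).getD k 0) q
          - wget sw ((cuts.getD p []).getD j 0) ((cuts.getD p []).getD j 0)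
          + wget sw ((cuts.getD q []).getD k 0) ((cuts.getD p []).getD j 0)
          + wget sw ((cuts.getD p []).getD j 0) ((cuts.getD q []).getD k 0)
          - wget sw ((cuts.getD q []).getD k 0) ((cuts.getD q []).getD k 0) < 0 := by
    rw [calcCV_eq, calcCV_eq, key]
    exact add_lt_iff_neg_left
  simp only [getD_map_int _ _ hj', getD_map_int _ _ hk']
  simp only [hiff]
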